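-- pv_equiv track=rewrite | github.com/dmaynor/WraithSpec | vap_micro.py | _split_topline
-- ===== SOURCE A (Python) =====
-- from typing import Dict, List, Tuple
--
-- def _split_topline(line: str) -> Tuple[str, List[str]]:
--     if not line or "|" not in line:
--         raise ValueError("Invalid micro-line: missing '|' separators")
--
--     segments: List[str] = []
--     current: List[str] = []
--     escaped = False
--     for ch in line.strip():
--         if escaped:
--             current.append(ch)
--             escaped = False
--             continue
--         if ch == "\\":
--             current.append(ch)
--             escaped = True
--             continue
--         if ch == "|":
--             segments.append("".join(current))
--             current = []
--             continue
--         current.append(ch)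
--
--     segments.append("".join(current))
--     parts = [p for p in segments if p != ""]
--     return parts[0].strip(), parts[1:]
-- ===== SOURCE B (Python) =====
-- from typing import List, Tuple
--
-- def _split_topline(line: str) -> Tuple[str, List[str]]:
--     if not line or "|" not in line:
--         raise ValueError("Invalid micro-line: missing '|' separators")
--
--     s = line.strip()
--     # one scan recording positions of each unescaped '|'
--     cuts: List[int] = []
--     escaped = False
--     for i, ch in enumerate(s):
--         if escaped:
--             escaped = False
--         elif ch == "\\":
--             escaped = True
--         elif ch == "|":
--             cuts.append(i)
--     # slice the stripped string at the recorded cut positions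
--     segments: List[str] = []
--     prev = 0
--     for c in cuts:
--         segments.append(s[prev:c])
--         prev = c + 1
--     segments.append(s[prev:])
--     parts = [p for p in segments if p != ""]
--     return parts[0].strip(), parts[1:]
-- ===== Notes on version B (the rewrite author's own statement) =====
-- stated objective: alternative
-- what changed: Instead of accumulating characters into per-segment buffers, B scans once recording the positions of each unescaped '|' and then slices the stripped string between consecutive cut positions; filtering and the return are as in A.
-- outside the precondition, e.g. on _split_topline('|'): A raises IndexError, B raises IndexError
import Mathlib
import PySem

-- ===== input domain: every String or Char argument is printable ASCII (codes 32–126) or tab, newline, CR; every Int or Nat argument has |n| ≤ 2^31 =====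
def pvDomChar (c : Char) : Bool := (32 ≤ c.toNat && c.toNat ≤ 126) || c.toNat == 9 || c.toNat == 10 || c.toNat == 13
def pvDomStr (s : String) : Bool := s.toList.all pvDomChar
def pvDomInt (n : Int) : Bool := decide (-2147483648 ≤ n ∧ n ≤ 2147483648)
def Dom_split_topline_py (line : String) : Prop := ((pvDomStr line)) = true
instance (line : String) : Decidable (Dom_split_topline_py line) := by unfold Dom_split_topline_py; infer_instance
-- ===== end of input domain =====

-- B records the positions of each unescaped '|' in one scan and slices the stripped
-- string at those cuts, instead of A's char-by-char segment buffers (objective: alternative).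
-- Both Pythons raise (ValueError / IndexError) outside Pre_; the ports return a dummy there.

-- ===== PORT A =====
-- A's for-loop over line.strip() with state (segments, current, escaped); the final
-- "".join/append is the trailing singleton in the [] case.  Segments are kept as
-- List Char and turned into String at the very end (exact: str ↔ List Char).
def pvALoop (l : List Char) (segs : List (List Char)) (cur : List Char) (esc : Bool) :
    List (List Char) :=
  match l with
  | [] => segs ++ [cur]
  | ch :: t =>
    if esc then pvALoop t segs (cur ++ [ch]) false
    else if ch = '\\' then pvALoop t segs (cur ++ [ch]) true
    else if ch = '|' then pvALoop t (segs ++ [cur]) [] false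
    else pvALoop t segs (cur ++ [ch]) false

def split_topline_py (line : String) : String × List String :=
  -- Python raises ValueError here; excluded by Pre_ (dummy value)
  if line.toList = [] ∨ ¬ line.toList.contains '|' then ("", [])
  else
    let segments := pvALoop (PySem.Chars.strip line.toList) [] [] false
    let parts := segments.filter (· ≠ [])
    -- parts[0] raises IndexError when parts = []; excluded by Pre_ (headD dummy)
    (String.ofList (PySem.Chars.strip (parts.headD [])), (parts.drop 1).map String.ofList)

-- ===== PORT B =====
-- B's first loop: for i, ch in enumerate(s) collecting positions of unescaped '|'
def pvCuts (l : List (Int × Char)) (esc : Bool) : List Int :=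
  match l with
  | [] => []
  | (i, ch) :: t =>
    if esc then pvCuts t false
    else if ch = '\\' then pvCuts t true
    else if ch = '|' then i :: pvCuts t false
    else pvCuts t false

-- B's second loop: slice s between consecutive cuts (s[prev:c], prev = c+1; s[prev:] at the end)
def pvSliceBy (s : List Char) (prev : Int) (cuts : List Int) : List (List Char) :=
  match cuts with
  | [] => [PySem.List.slice s (some prev) none]
  | c :: t => PySem.List.slice s (some prev) (some c) :: pvSliceBy s (c + 1) t

def split_topline_py_alt (line : String) : String × List String :=
  -- Python raises ValueError here; excluded by Pre_ (dummy value)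
  if line.toList = [] ∨ ¬ line.toList.contains '|' then ("", [])
  else
    let s := PySem.Chars.strip line.toList
    let cuts := pvCuts (PySem.List.enumerate s 0) false
    let segments := pvSliceBy s 0 cuts
    let parts := segments.filter (· ≠ [])
    -- parts[0] raises IndexError when parts = []; excluded by Pre_ (headD dummy)
    (String.ofList (PySem.Chars.strip (parts.headD [])), (parts.drop 1).map String.ofList)

-- ===== PRECONDITION & SPEC =====
-- Pre_ = exactly the inputs on which Python A returns: A raises ValueError when the line is
-- empty or has no '|', and IndexError (parts[0] on []) when the stripped line is all '|'s
-- (then every segment is empty).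
def Pre_split_topline_py (line : String) : Prop :=
  line.toList ≠ [] ∧ line.toList.contains '|' = true ∧
    (PySem.Chars.strip line.toList).any (· ≠ '|') = true
instance (line : String) : Decidable (Pre_split_topline_py line) := by
  unfold Pre_split_topline_py; infer_instance

def pvWitness_split_topline_py : String := "a|b"

def Spec_split_topline_py (line : String) (out : String × List String) : Prop := out = split_topline_py_alt line
instance (line : String) (out : String × List String) : Decidable (Spec_split_topline_py line out) := by unfold Spec_split_topline_py; infer_instance

-- ===== CLAIM (what is proved, stated in full; the proofs are below) =====
def Claim_equal_split_topline_py : Prop := ∀ (line : String), Dom_split_topline_py line → Pre_split_topline_py line → Spec_split_topline_py line (split_topline_py line)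

-- ===== LEMMAS AND PROOFS =====

-- reference split: segments of l under escape semantics, starting with flag esc
def pvMapHead (f : List Char → List Char) : List (List Char) → List (List Char)
  | [] => []
  | h :: t => f h :: t

def pvSplitEsc (esc : Bool) (l : List Char) : List (List Char) :=
  match l with
  | [] => [[]]
  | ch :: t =>
    if esc then pvMapHead (ch :: ·) (pvSplitEsc false t)
    else if ch = '\\' then pvMapHead (ch :: ·) (pvSplitEsc true t)
    else if ch = '|' then [] :: pvSplitEsc false t
    else pvMapHead (ch :: ·) (pvSplitEsc false t)

theorem pvMapHead_comp (f g : List Char → List Char) (l : List (List Char)) :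
    pvMapHead f (pvMapHead g l) = pvMapHead (fun x => f (g x)) l := by
  cases l <;> simp [pvMapHead]

-- A-side characterisation
theorem pvALoop_eq (l : List Char) (esc : Bool) (segs : List (List Char)) (cur : List Char) :
    pvALoop l segs cur esc = segs ++ pvMapHead (cur ++ ·) (pvSplitEsc esc l) := by
  induction l generalizing esc segs cur with
  | nil => simp [pvALoop, pvSplitEsc, pvMapHead]
  | cons ch t ih =>
    simp only [pvALoop, pvSplitEsc]
    split_ifs with h1 h2 h3
    · rw [ih, pvMapHead_comp]; simp
    · rw [ih, pvMapHead_comp]; simp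
    · rw [ih]
      cases h : pvSplitEsc false t <;> simp [pvMapHead]
    · rw [ih, pvMapHead_comp]; simp

-- every cut produced from enumerate l k is ≥ k
theorem pvCuts_ge (l : List Char) (k : Int) (esc : Bool) :
    ∀ c ∈ pvCuts (PySem.List.enumerate l k) esc, k ≤ c := by
  induction l generalizing k esc with
  | nil => simp [PySem.List.enumerate_nil, pvCuts]
  | cons ch t ih =>
    intro c hc
    rw [PySem.List.enumerate_cons] at hc
    simp only [pvCuts] at hc
    split_ifs at hc with h1 h2 h3
    · have := ih (k + 1) false c hc; omega
    · have := ih (k + 1) true c hc; omega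
    · rcases List.mem_cons.mp hc with rfl | hc
      · omega
      · have := ih (k + 1) false c hc; omega
    · have := ih (k + 1) false c hc; omega

-- consuming one char at position k prepends it to the head slice
theorem pvSliceBy_cons (s : List Char) (k : Nat) (ch : Char) (hk : s.drop k = ch :: s.drop (k + 1))
    (cuts : List Int) (hge : ∀ c ∈ cuts, (k : Int) + 1 ≤ c) :
    pvSliceBy s (k : Int) cuts = pvMapHead (ch :: ·) (pvSliceBy s ((k : Int) + 1) cuts) := by
  cases cuts with
  | nil =>
    simp only [pvSliceBy, pvMapHead]
    rw [PySem.List.slice_from_natCast,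
      show ((k : Int) + 1) = ((k + 1 : Nat) : Int) by push_cast; ring,
      PySem.List.slice_from_natCast, hk]
  | cons c t =>
    have hc : (k : Int) + 1 ≤ c := hge c (by simp)
    simp only [pvSliceBy, pvMapHead, List.cons.injEq]
    refine ⟨?_, trivial⟩
    · have hcn : c = ((c.toNat : Nat) : Int) := by omega
      rw [hcn, PySem.List.slice_natCast,
        show ((k : Int) + 1) = ((k + 1 : Nat) : Int) by push_cast; ring,
        PySem.List.slice_natCast, hk]
      have : c.toNat - k = (c.toNat - (k + 1)) + 1 := by omega
      rw [this, List.take_succ_cons]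

-- main B-side characterisation: slicing at the recorded cuts is the escape split
theorem pvSliceBy_cuts (l : List Char) (k : Nat) (esc : Bool) (s : List Char)
    (hs : s.drop k = l) :
    pvSliceBy s (k : Int) (pvCuts (PySem.List.enumerate l (k : Int)) esc)
      = pvSplitEsc esc l := by
  induction l generalizing k esc with
  | nil => simp [PySem.List.enumerate_nil, pvCuts, pvSliceBy, pvSplitEsc,
      PySem.List.slice_from_natCast, hs]
  | cons ch t ih =>
    have hk1 : s.drop (k + 1) = t := by
      have h := congrArg List.tail hs
      rw [List.tail_drop] at h
      simpa using h
    have hdrop : s.drop k = ch :: s.drop (k + 1) := by rw [hs, hk1]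
    have hcast : ((k : Int) + 1) = ((k + 1 : Nat) : Int) := by push_cast; ring
    rw [PySem.List.enumerate_cons]
    simp only [pvCuts, pvSplitEsc]
    split_ifs with h1 h2 h3
    · rw [pvSliceBy_cons s k ch hdrop _ (by
        intro c hc; have := pvCuts_ge t ((k : Int) + 1) false c (by rwa [hcast] at hc ⊢); omega),
        hcast, ih (k + 1) false hk1]
    · rw [pvSliceBy_cons s k ch hdrop _ (by
        intro c hc; have := pvCuts_ge t ((k : Int) + 1) true c (by rwa [hcast] at hc ⊢); omega),
        hcast, ih (k + 1) true hk1]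
    · simp only [pvSliceBy]
      rw [PySem.List.slice_natCast]
      simp only [Nat.sub_self, List.take_zero]
      rw [hcast, ih (k + 1) false hk1]
    · rw [pvSliceBy_cons s k ch hdrop _ (by
        intro c hc; have := pvCuts_ge t ((k : Int) + 1) false c (by rwa [hcast] at hc ⊢); omega),
        hcast, ih (k + 1) false hk1]

theorem pvMapHead_nil_append (l : List (List Char)) :
    pvMapHead ([] ++ ·) l = l := by cases l <;> simp [pvMapHead]

theorem pvSegments_eq (s : List Char) :
    pvALoop s [] [] false = pvSliceBy s 0 (pvCuts (PySem.List.enumerate s 0) false) := by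
  rw [pvALoop_eq, pvMapHead_nil_append]
  have := pvSliceBy_cuts s 0 false s (by simp)
  simpa using this.symm

-- ===== VERDICT (by name: the statement is the Claim_ definition above) =====
theorem split_topline_py_spec : Claim_equal_split_topline_py := by
  intro line _ _
  unfold Spec_split_topline_py split_topline_py split_topline_py_alt
  split_ifs with h
  · rfl
  · simp only [pvSegments_eq]
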